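-- pv_equiv track=rewrite | github.com/cvrnogueira/SimulatedAnnealing_ACDM | simulatedAnnealing.py | getInitialSolution
-- ===== SOURCE A (Python) =====
-- def getInitialSolution(P):
--     #Add descending order because we think this way the initial solution will be better
--     P.sort(reverse=True)
--     #start s array with -1
--     s = [-1] * len(P)
--     #Create the first and second si's because they are always the same
--     i = 1
--     s[i-1] = 0
--     s[i] = s[i-1] + P[i]
--     # start algorithm for the rest of the P's list
--     for i in range(2, len(P)):
--         gap1 = abs(s[i-2] - s[i-1])
--         gap2 = abs((s[i-1] - P[i-1]))
--         max_gap = max(gap1, gap2)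
--         #Transform into feasible solution
--         if 2*P[i] > max_gap:
--             for j in range(1, len(P)):
--              if s[j] > s[i]:
--                 s[j] = s[j] + 2*P[i] - max_gap
--         #continue with the algorithm
--         if max_gap == gap1:
--             s[i] = s[i-2] + P[i]
--         else:
--             s[i] = s[i-1] + P[i]
--     return (P,s)
-- ===== SOURCE B (Python) =====
-- def getInitialSolution(P):
--     # One pass with a running offset: every feasibility shift applies to all
--     # already-placed boundaries s[1..i-1], so it is enough to accumulate the
--     # total shift in `off` and store each boundary relative to it; the final
--     # list is reconstructed in one comprehension.  (P is sorted in place.)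
--     P.sort(reverse=True)
--     n = len(P)
--     off = 0                 # cumulative shift; s[j] = rel[j] + off for j >= 1
--     rel = [0] * n
--     rel[1] = P[1]
--
--     def s(j):               # current value of boundary j (s[0] is pinned at 0)
--         return rel[j] + off if j >= 1 else 0
--
--     for i in range(2, n):
--         gap1 = abs(s(i - 2) - s(i - 1))
--         max_gap = max(gap1, abs(s(i - 1) - P[i - 1]))
--         if 2 * P[i] > max_gap:
--             off += 2 * P[i] - max_gap
--         rel[i] = (s(i - 2) if max_gap == gap1 else s(i - 1)) + P[i] - off
--     return (P, [0] + [rel[j] + off for j in range(1, n)])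
-- ===== Notes on version B (the rewrite author's own statement) =====
-- stated objective: alternative
-- what changed: A rescans and shifts the whole s array inside the outer loop whenever a feasibility fix is needed; B accumulates a single running offset, stores each boundary relative to it, and reconstructs the final array in one comprehension, so the inner rescan disappears. Pre_ excludes only lists of length < 2, on which A raises IndexError.
import Mathlib
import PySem

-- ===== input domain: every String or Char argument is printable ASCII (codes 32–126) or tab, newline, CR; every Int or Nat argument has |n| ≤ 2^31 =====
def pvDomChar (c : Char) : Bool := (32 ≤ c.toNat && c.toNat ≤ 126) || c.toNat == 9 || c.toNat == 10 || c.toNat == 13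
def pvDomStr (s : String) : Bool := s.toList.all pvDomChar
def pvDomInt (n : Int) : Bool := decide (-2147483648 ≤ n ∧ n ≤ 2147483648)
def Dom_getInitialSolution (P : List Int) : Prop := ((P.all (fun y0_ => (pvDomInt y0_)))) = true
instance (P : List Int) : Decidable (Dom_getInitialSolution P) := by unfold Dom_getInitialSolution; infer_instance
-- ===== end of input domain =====

-- B replaces A's rescan-and-shift inner loop by a single running offset applied to every placed
-- boundary, reconstructing the final array in one pass (alternative algorithm, same return value).
-- Both A and B sort the argument P in place (same mutation); the claim is about the return value.

-- ===== PORT A =====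
-- pvGet s j = s[j] for the in-range nonnegative indices these programs use (Pre_ gives len ≥ 2)
def pvGet (s : List Int) (j : Nat) : Int := s.getD j 0

-- inner loop of A: for j in range(1, len(P)): if s[j] > s[i]: s[j] = s[j] + d
def pvShiftA (n p : Nat) (d : Int) (s : List Int) : List Int :=
  (PySem.List.pyRange 1 (n : Int) 1).foldl
    (fun s j => if pvGet s j.toNat > pvGet s p then s.set j.toNat (pvGet s j.toNat + d) else s) s

-- one iteration of A's outer loop
def pvStepA (P : List Int) (s : List Int) (i : Nat) : List Int :=
  let gap1 := |pvGet s (i-2) - pvGet s (i-1)|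
  let gap2 := |pvGet s (i-1) - pvGet P (i-1)|
  let maxGap := max gap1 gap2
  let s := if 2 * pvGet P i > maxGap then pvShiftA P.length i (2 * pvGet P i - maxGap) s else s
  if maxGap = gap1 then s.set i (pvGet s (i-2) + pvGet P i)
  else s.set i (pvGet s (i-1) + pvGet P i)

def getInitialSolution (P : List Int) : List Int × List Int :=
  let P := PySem.List.sorted P (fun x => x) true
  let s := List.replicate P.length (-1 : Int)
  let s := s.set 0 0
  let s := s.set 1 (pvGet s 0 + pvGet P 1)
  let s := (PySem.List.pyRange 2 (P.length : Int) 1).foldl (fun s i => pvStepA P s i.toNat) s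
  (P, s)

-- ===== PORT B =====
-- B's helper s(j): the current value of boundary j (s[0] is pinned at 0)
def pvS (rel : List Int) (off : Int) (j : Nat) : Int :=
  if 1 ≤ j then rel.getD j 0 + off else 0

-- one iteration of B's loop over the state (rel, off)
def pvStepB (P : List Int) (st : List Int × Int) (i : Nat) : List Int × Int :=
  let rel := st.1
  let off := st.2
  let gap1 := |pvS rel off (i-2) - pvS rel off (i-1)|
  let maxGap := max gap1 |pvS rel off (i-1) - pvGet P (i-1)|
  let off := if 2 * pvGet P i > maxGap then off + (2 * pvGet P i - maxGap) else off
  (rel.set i ((if maxGap = gap1 then pvS rel off (i-2) else pvS rel off (i-1)) + pvGet P i - off),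
   off)

def getInitialSolution_alt (P : List Int) : List Int × List Int :=
  let P := PySem.List.sorted P (fun x => x) true
  let n := P.length
  let rel := (List.replicate n (0 : Int)).set 1 (pvGet P 1)
  let st := (PySem.List.pyRange 2 (n : Int) 1).foldl (fun st i => pvStepB P st i.toNat) (rel, 0)
  (P, [0] ++ (PySem.List.pyRange 1 (n : Int) 1).map (fun j => st.1.getD j.toNat 0 + st.2))

-- ===== PRECONDITION & SPEC =====
-- Python A raises IndexError (at s[1]) when len(P) < 2; B raises there too; those inputs are excluded.
def Pre_getInitialSolution (P : List Int) : Prop := 2 ≤ P.length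
instance (P : List Int) : Decidable (Pre_getInitialSolution P) := by
  unfold Pre_getInitialSolution; infer_instance
def pvWitness_getInitialSolution : List Int := [1, 2]

def Spec_getInitialSolution (P : List Int) (out : List Int × List Int) : Prop := out = getInitialSolution_alt P
instance (P : List Int) (out : List Int × List Int) : Decidable (Spec_getInitialSolution P out) := by unfold Spec_getInitialSolution; infer_instance

-- ===== CLAIM (what is proved, stated in full; the proofs are below) =====
def Claim_equal_getInitialSolution : Prop := ∀ (P : List Int), Dom_getInitialSolution P → Pre_getInitialSolution P → Spec_getInitialSolution P (getInitialSolution P)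

-- ===== LEMMAS AND PROOFS =====

theorem pvGetD_set {α : Type} (c : List α) (m : Nat) (v : α) (j : Nat) (d : α) :
    (c.set m v).getD j d = if m = j ∧ m < c.length then v else c.getD j d := by
  simp only [List.getD, List.getElem?_set]
  split_ifs <;> simp_all
  omega

theorem pvGetD_replicate {α : Type} (n j : Nat) (a d : α) :
    (List.replicate n a).getD j d = if j < n then a else d := by
  simp only [List.getD, List.getElem?_replicate]
  split_ifs <;> simp

-- generic invariant rule for a fold over range(t, b)
theorem pvFoldInv {σ : Type} (b : Int) (f : σ → Int → σ) (motive : Int → σ → Prop)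
    (step : ∀ t s, t < b → motive t s → motive (t+1) (f s t)) :
    ∀ t s, t ≤ b → motive t s → motive b ((PySem.List.pyRange t b 1).foldl f s) := by
  intro t s htb hm
  obtain ⟨k, hk⟩ : ∃ k : Nat, (b - t).toNat = k := ⟨_, rfl⟩
  induction k generalizing t s with
  | zero =>
      have hbt : t = b := by omega
      subst hbt
      rw [PySem.List.pyRange_one_eq_nil le_rfl]
      simpa using hm
  | succ k ih =>
      have hlt : t < b := by omega
      rw [PySem.List.pyRange_one_cons hlt]
      simp only [List.foldl_cons]
      exact ih (t+1) (f s t) (by omega) (step t s hlt hm) (by omega)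

-- running A's loop and B's loop in lockstep is the pair of the two folds
theorem pvFoldPairAB (Q : List Int) (l : List Int) (a : List Int) (b : List Int × Int) :
    l.foldl (fun p t => (pvStepA Q p.1 t.toNat, pvStepB Q p.2 t.toNat)) (a, b) =
    (l.foldl (fun s t => pvStepA Q s t.toNat) a, l.foldl (fun st t => pvStepB Q st t.toNat) b) := by
  induction l generalizing a b with
  | nil => rfl
  | cons x xs ih => simp only [List.foldl_cons]; rw [ih]

-- what A's inner loop does: add d to every entry of index ≥ 1 that is > -1
-- (the pivot p, holding -1, is never changed, so the comparison value is constant)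
theorem pvShiftA_spec (n p : Nat) (d : Int) (s : List Int)
    (hlen : s.length = n) (hp : s.getD p 0 = -1) :
    (pvShiftA n p d s).length = n ∧
    (∀ j : Nat, (pvShiftA n p d s).getD j 0 =
      if 1 ≤ j ∧ j < n ∧ s.getD j 0 > -1 then s.getD j 0 + d else s.getD j 0) := by
  by_cases hn : n = 0
  · subst hn
    have he : pvShiftA 0 p d s = s := by
      unfold pvShiftA
      rw [show ((0:Nat):Int) = 0 from rfl, PySem.List.pyRange_one_eq_nil (by norm_num)]
      rfl
    rw [he]
    refine ⟨hlen, fun j => ?_⟩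
    rw [if_neg (by rintro ⟨-, h2, -⟩; omega)]
  · unfold pvShiftA
    have main := pvFoldInv (σ := List Int) (n : Int)
      (fun c j => if pvGet c j.toNat > pvGet c p then c.set j.toNat (pvGet c j.toNat + d) else c)
      (fun t c => 1 ≤ t ∧ c.length = n ∧
        ∀ j : Nat, c.getD j 0 =
          if 1 ≤ j ∧ j < n ∧ (j : Int) < t ∧ s.getD j 0 > -1 then s.getD j 0 + d else s.getD j 0)
      ?step 1 s (by exact_mod_cast Nat.one_le_iff_ne_zero.mpr hn)
      ⟨le_rfl, hlen, fun j => by rw [if_neg (by rintro ⟨h1, -, h3, -⟩; omega)]⟩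
    · obtain ⟨-, hL, hJ⟩ := main
      refine ⟨hL, fun j => ?_⟩
      rw [hJ j]
      by_cases hA : 1 ≤ j ∧ j < n ∧ s.getD j 0 > -1
      · rw [if_pos ⟨hA.1, hA.2.1, by exact_mod_cast hA.2.1, hA.2.2⟩, if_pos hA]
      · rw [if_neg (by rintro ⟨h1, h2, -, h4⟩; exact hA ⟨h1, h2, h4⟩), if_neg hA]
    case step =>
      rintro t c hlt ⟨ht1, hlen', hc⟩
      refine ⟨by omega, ?_, ?_⟩
      · dsimp only
        split_ifs
        · rw [List.length_set]; exact hlen'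
        · exact hlen'
      · intro j
        have htn : t.toNat < n := by omega
        have hct : c.getD t.toNat 0 = s.getD t.toNat 0 := by
          rw [hc t.toNat, if_neg (by rintro ⟨-, -, h3, -⟩; omega)]
        have hcp : c.getD p 0 = -1 := by
          rw [hc p]
          split_ifs with h
          · rw [hp] at h; omega
          · exact hp
        have hcondIff : (pvGet c t.toNat > pvGet c p) ↔ s.getD t.toNat 0 > -1 := by
          unfold pvGet; rw [hct, hcp]
        dsimp only
        by_cases hsp : s.getD t.toNat 0 > -1
        · rw [if_pos (hcondIff.mpr hsp), pvGetD_set]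
          by_cases hjt : t.toNat = j
          · subst hjt
            rw [if_pos ⟨rfl, hlen' ▸ htn⟩,
              if_pos ⟨by omega, htn, by omega, hsp⟩]
            unfold pvGet
            rw [hct]
          · rw [if_neg (by rintro ⟨h1, -⟩; exact hjt h1), hc j,
              if_congr (show (1 ≤ j ∧ j < n ∧ (j:Int) < t ∧ s.getD j 0 > -1) ↔
                  (1 ≤ j ∧ j < n ∧ (j:Int) < t + 1 ∧ s.getD j 0 > -1) from by
                have hne : (j : Int) ≠ t := by omega
                constructor
                · rintro ⟨a, b, c', e⟩; exact ⟨a, b, by omega, e⟩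
                · rintro ⟨a, b, c', e⟩; exact ⟨a, b, by omega, e⟩) rfl rfl]
        · rw [if_neg (fun h => hsp (hcondIff.mp h)), hc j]
          by_cases hjt : t.toNat = j
          · subst hjt
            rw [if_neg (by rintro ⟨-, -, h3, -⟩; omega),
              if_neg (by rintro ⟨-, -, -, h4⟩; exact hsp h4)]
          · rw [if_congr (show (1 ≤ j ∧ j < n ∧ (j:Int) < t ∧ s.getD j 0 > -1) ↔
                  (1 ≤ j ∧ j < n ∧ (j:Int) < t + 1 ∧ s.getD j 0 > -1) from by
                have hne : (j : Int) ≠ t := by omega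
                constructor
                · rintro ⟨a, b, c', e⟩; exact ⟨a, b, by omega, e⟩
                · rintro ⟨a, b, c', e⟩; exact ⟨a, b, by omega, e⟩) rfl rfl]

-- the simulation invariant: A's array s is described by B's state (rel, off);
-- the last clause records that a placed boundary whose value fell to ≤ -1 sits over a negative
-- element of Q — with Q sorted descending that forbids any later shift, so the offset stays exact
def pvInv (Q : List Int) (i : Int) (s : List Int) (rel : List Int) (off : Int) : Prop :=
  s.length = Q.length ∧ rel.length = Q.length ∧
  (∀ j : Nat, j < Q.length →
    s.getD j 0 = if j = 0 then 0 else if (j : Int) < i then rel.getD j 0 + off else -1) ∧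
  (∀ j : Nat, 1 ≤ j → (j : Int) < i → rel.getD j 0 + off ≤ -1 → Q.getD j 0 < 0)

-- one outer iteration preserves the simulation invariant
theorem pvStep_inv (Q : List Int) (i : Int) (s : List Int) (rel : List Int) (off : Int)
    (hsort : ∀ a b : Nat, a ≤ b → b < Q.length → Q.getD b 0 ≤ Q.getD a 0)
    (h2 : 2 ≤ i) (hin : i < (Q.length : Int)) (h : pvInv Q i s rel off) :
    pvInv Q (i+1) (pvStepA Q s i.toNat) (pvStepB Q (rel, off) i.toNat).1
      (pvStepB Q (rel, off) i.toNat).2 := by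
  obtain ⟨hsl, hrl, hC, hE⟩ := h
  have hIi : (i.toNat : Int) = i := Int.toNat_of_nonneg (by omega)
  set n := Q.length with hn
  set I := i.toNat with hI
  have hIn : I < n := by omega
  have hcur : ∀ j : Nat, (j : Int) < i → j < n → s.getD j 0 = pvS rel off j := by
    intro j hj hjn
    rw [hC j hjn]
    by_cases hj0 : j = 0
    · subst hj0; simp [pvS]
    · rw [if_neg hj0, if_pos hj]; unfold pvS; rw [if_pos (by omega)]
  simp only [pvStepA, pvStepB, pvGet]
  rw [← hcur (I-2) (by omega) (by omega), ← hcur (I-1) (by omega) (by omega)]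
  set g1 : Int := |s.getD (I-2) 0 - s.getD (I-1) 0| with hg1
  set mg : Int := max g1 |s.getD (I-1) 0 - Q.getD (I-1) 0| with hmgdef
  have hmg0 : 0 ≤ mg := le_trans (abs_nonneg _) (le_max_left _ _)
  set off' : Int := (if 2 * Q.getD I 0 > mg then off + (2 * Q.getD I 0 - mg) else off) with hoff'
  set s₁ : List Int := (if 2 * Q.getD I 0 > mg then pvShiftA n I (2 * Q.getD I 0 - mg) s else s)
    with hs₁
  have h1 : s₁.length = n ∧ off ≤ off' ∧
      (∀ j : Nat, j < n →
        s₁.getD j 0 = if j = 0 then 0 else if (j : Int) < i then rel.getD j 0 + off' else -1) := by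
    by_cases hcond : 2 * Q.getD I 0 > mg
    · have hQI : 0 < Q.getD I 0 := by omega
      have hsI : s.getD I 0 = -1 := by
        rw [hC I hIn, if_neg (by omega), if_neg (by omega)]
      obtain ⟨hL, hS⟩ := pvShiftA_spec n I (2 * Q.getD I 0 - mg) s hsl hsI
      have hoffeq : off' = off + (2 * Q.getD I 0 - mg) := by rw [hoff', if_pos hcond]
      have hs1eq : s₁ = pvShiftA n I (2 * Q.getD I 0 - mg) s := by rw [hs₁, if_pos hcond]
      simp only [hoffeq, hs1eq]
      refine ⟨hL, by omega, ?_⟩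
      intro j hjn
      rw [hS j]
      by_cases hj0 : j = 0
      · subst hj0
        rw [if_neg (by rintro ⟨h1, -⟩; omega), hC 0 hjn]
        norm_num
      · rw [if_neg hj0]
        by_cases hji : (j : Int) < i
        · -- placed boundary: it is > -1, because Q[j] ≥ Q[I] > 0 rules clause 4 out
          have hQj : 0 < Q.getD j 0 := lt_of_lt_of_le hQI (hsort j I (by omega) hIn)
          have hgt : s.getD j 0 > -1 := by
            rw [hC j hjn, if_neg hj0, if_pos hji]
            by_contra hle
            exact absurd (hE j (by omega) hji (by omega)) (by omega)
          have hsj : s.getD j 0 = rel.getD j 0 + off := by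
            rw [hC j hjn, if_neg hj0, if_pos hji]
          rw [if_pos ⟨by omega, hjn, hgt⟩, if_pos hji, hsj]
          ring
        · have hsj : s.getD j 0 = -1 := by
            rw [hC j hjn, if_neg hj0, if_neg hji]
          rw [if_neg (by rintro ⟨-, -, h3⟩; omega), hsj, if_neg hji]
    · have hoffeq : off' = off := by rw [hoff', if_neg hcond]
      have hs1eq : s₁ = s := by rw [hs₁, if_neg hcond]
      simp only [hoffeq, hs1eq]
      exact ⟨hsl, le_rfl, fun j hjn => hC j hjn⟩
  obtain ⟨h1L, h1off, h1C⟩ := h1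
  have hcur' : ∀ j : Nat, (j : Int) < i → j < n → s₁.getD j 0 = pvS rel off' j := by
    intro j hj hjn
    rw [h1C j hjn]
    by_cases hj0 : j = 0
    · subst hj0; simp [pvS]
    · rw [if_neg hj0, if_pos hj]; unfold pvS; rw [if_pos (by omega)]
  -- the final assignment, uniform over which predecessor is chosen
  have hfinal : ∀ p : Nat, p = I - 2 ∨ p = I - 1 →
      pvInv Q (i+1) (s₁.set I (s₁.getD p 0 + Q.getD I 0))
        (rel.set I (pvS rel off' p + Q.getD I 0 - off')) off' := by
    rintro p hp
    have hpi : (p : Int) < i := by omega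
    have hpn : p < n := by omega
    have hps : s₁.getD p 0 = pvS rel off' p := hcur' p hpi hpn
    refine ⟨by rw [List.length_set]; exact h1L, by rw [List.length_set]; exact hrl, ?_, ?_⟩
    · intro j hjn
      rw [pvGetD_set, pvGetD_set]
      by_cases hjI : I = j
      · subst hjI
        rw [if_pos ⟨rfl, h1L ▸ hIn⟩, if_neg (show ¬I = 0 by omega),
          if_pos (show (I : Int) < i + 1 by omega), if_pos ⟨rfl, hrl ▸ hIn⟩, hps]
        ring
      · rw [if_neg (show ¬(I = j ∧ I < s₁.length) from fun hc => hjI hc.1),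
          if_neg (show ¬(I = j ∧ I < rel.length) from fun hc => hjI hc.1), h1C j hjn]
        by_cases hj0 : j = 0
        · rw [if_pos hj0, if_pos hj0]
        · rw [if_neg hj0, if_neg hj0]
          by_cases hji : (j : Int) < i
          · rw [if_pos hji, if_pos (by omega)]
          · rw [if_neg hji, if_neg (by omega)]
    · intro j hj1 hji1 hle
      rw [pvGetD_set] at hle
      by_cases hjI : I = j
      · subst hjI
        rw [if_pos ⟨rfl, hrl ▸ hIn⟩] at hle
        -- pvS rel off' p + Q[I] ≤ -1 forces Q[I] < 0
        by_contra hQ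
        have hQ' : 0 ≤ Q.getD I 0 := by omega
        have hpneg : pvS rel off' p ≤ -1 := by omega
        by_cases hp0 : p = 0
        · rw [hp0] at hpneg; simp [pvS] at hpneg
        · have : rel.getD p 0 + off' ≤ -1 := by
            unfold pvS at hpneg; rw [if_pos (by omega)] at hpneg; exact hpneg
          have hQp : Q.getD p 0 < 0 := hE p (by omega) hpi (by omega)
          exact absurd (hsort p I (by omega) hIn) (by omega)
      · rw [if_neg (by rintro ⟨h1, -⟩; exact hjI h1)] at hle
        exact hE j hj1 (by omega) (by omega)
  by_cases hmg : mg = g1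
  · rw [if_pos hmg, if_pos hmg]
    exact hfinal (I - 2) (Or.inl rfl)
  · rw [if_neg hmg, if_neg hmg]
    exact hfinal (I - 1) (Or.inr rfl)

-- the invariant holds after the two hand-written assignments (s[0], s[1] / rel[1])
theorem pvInit (Q : List Int) (h2 : 2 ≤ Q.length) :
    pvInv Q 2
      (((List.replicate Q.length (-1 : Int)).set 0 0).set 1
        (pvGet ((List.replicate Q.length (-1 : Int)).set 0 0) 0 + pvGet Q 1))
      ((List.replicate Q.length (0 : Int)).set 1 (pvGet Q 1)) 0 := by
  have hv : pvGet ((List.replicate Q.length (-1 : Int)).set 0 0) 0 = 0 := by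
    unfold pvGet
    rw [pvGetD_set, if_pos ⟨rfl, by rw [List.length_replicate]; omega⟩]
  rw [hv]
  refine ⟨by simp, by simp, ?_, ?_⟩
  · intro j hjn
    rw [pvGetD_set]
    by_cases hj1 : j = 1
    · subst hj1
      rw [if_pos ⟨rfl, by rw [List.length_set, List.length_replicate]; omega⟩,
        if_neg (by omega), if_pos (by norm_num), pvGetD_set,
        if_pos ⟨rfl, by rw [List.length_replicate]; omega⟩]
      unfold pvGet
      ring
    · rw [if_neg (by rintro ⟨ha, -⟩; exact hj1 ha.symm), pvGetD_set]
      by_cases hj0 : j = 0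
      · subst hj0
        rw [if_pos ⟨rfl, by rw [List.length_replicate]; omega⟩, if_pos rfl]
      · rw [if_neg (by rintro ⟨ha, -⟩; exact hj0 ha.symm), pvGetD_replicate, if_pos hjn,
          if_neg hj0, if_neg (by omega)]
  · intro j hj1 hj2 hle
    have hj : j = 1 := by omega
    subst hj
    rw [pvGetD_set, if_pos ⟨rfl, by rw [List.length_replicate]; omega⟩] at hle
    unfold pvGet at hle
    omega

-- Q = sorted(P, reverse=True) is pairwise descending, in getD form
theorem pvSortedDesc (P : List Int) :
    ∀ a b : Nat, a ≤ b → b < (PySem.List.sorted P (fun x => x) true).length →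
      (PySem.List.sorted P (fun x => x) true).getD b 0 ≤
      (PySem.List.sorted P (fun x => x) true).getD a 0 := by
  intro a b hab hb
  have hpw := PySem.List.sorted_pairwise_rev (xs := P) (key := fun x => x)
  rcases Nat.eq_or_lt_of_le hab with h | h
  · subst h; exact le_rfl
  · have := (List.pairwise_iff_getElem).mp hpw a b (by omega) hb h
    rw [List.getD_eq_getElem _ 0 hb, List.getD_eq_getElem _ 0 (lt_of_le_of_lt hab hb)]
    exact this

-- ===== VERDICT (by name: the statement is the Claim_ definition above) =====
theorem getInitialSolution_spec : Claim_equal_getInitialSolution := by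
  unfold Claim_equal_getInitialSolution
  intro P _hDom hPre
  unfold Pre_getInitialSolution at hPre
  unfold Spec_getInitialSolution
  simp only [getInitialSolution, getInitialSolution_alt]
  set Q := PySem.List.sorted P (fun x => x) true with hQ
  have hlenQ : Q.length = P.length := PySem.List.length_sorted P _ true
  have h2 : 2 ≤ Q.length := by omega
  have main := pvFoldInv (σ := List Int × (List Int × Int)) ((Q.length : Int))
    (fun p t => (pvStepA Q p.1 t.toNat, pvStepB Q p.2 t.toNat))
    (fun t p => 2 ≤ t ∧ pvInv Q t p.1 p.2.1 p.2.2)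
    (fun t p hlt hp =>
      ⟨by omega, pvStep_inv Q t p.1 p.2.1 p.2.2 (pvSortedDesc P) hp.1 hlt hp.2⟩)
    2
    ((((List.replicate Q.length (-1 : Int)).set 0 0).set 1
        (pvGet ((List.replicate Q.length (-1 : Int)).set 0 0) 0 + pvGet Q 1)),
      (((List.replicate Q.length (0 : Int)).set 1 (pvGet Q 1)), 0))
    (by exact_mod_cast h2) ⟨le_rfl, pvInit Q h2⟩
  rw [pvFoldPairAB] at main
  obtain ⟨-, hAL, -, hCf, -⟩ := main
  refine congrArg (Prod.mk Q) ?_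
  set st := (PySem.List.pyRange 2 (Q.length : Int) 1).foldl
      (fun st i => pvStepB Q st i.toNat)
      ((List.replicate Q.length (0 : Int)).set 1 (pvGet Q 1), 0) with hst
  have hBlen : ((0 : Int) :: (PySem.List.pyRange 1 (Q.length : Int) 1).map
      (fun j => st.1.getD j.toNat 0 + st.2)).length = Q.length := by
    rw [List.length_cons, List.length_map, PySem.List.length_pyRange_one]
    omega
  apply List.ext_getElem (by rw [hAL]; exact hBlen.symm)
  intro k hk1 hk2
  have hkn : k < Q.length := by rwa [hAL] at hk1
  rw [← List.getD_eq_getElem _ 0 hk1, hCf k hkn]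
  by_cases hk0 : k = 0
  · subst hk0
    rw [if_pos rfl]
    rfl
  · rw [if_neg hk0, if_pos (by exact_mod_cast hkn)]
    obtain ⟨m, hm⟩ : ∃ m, k = m + 1 := ⟨k - 1, by omega⟩
    subst hm
    simp only [List.singleton_append, List.getElem_cons_succ, List.getElem_map]
    rw [PySem.List.getElem_pyRange_one]
    have hmt : ((1 : Int) + m).toNat = m + 1 := by omega
    rw [hmt]
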